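-- pv_equiv track=rewrite | github.com/amryehia10/pendigits_classification | KNN.py | handle_tie
-- ===== SOURCE A (Python) =====
-- def handle_tie(neighbours):
--     equal = neighbours.count(neighbours[0])
--     flag = ''
--     for i in range(len(neighbours)):
--         if neighbours.count(neighbours[i]) == equal:
--             flag = 'E'
--         else:
--             flag = 'N'
--     return flag
-- ===== SOURCE B (Python) =====
-- def handle_tie(neighbours):
--     # B: A's loop overwrites flag each pass, so only the last index matters.
--     return 'E' if neighbours.count(neighbours[-1]) == neighbours.count(neighbours[0]) else 'N'
-- ===== Notes on version B (the rewrite author's own statement) =====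
-- stated objective: faster
-- what changed: A's loop overwrites flag on every iteration so only the last index matters; B drops the loop and directly compares the count of the last element with the count of the first.
import Mathlib
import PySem

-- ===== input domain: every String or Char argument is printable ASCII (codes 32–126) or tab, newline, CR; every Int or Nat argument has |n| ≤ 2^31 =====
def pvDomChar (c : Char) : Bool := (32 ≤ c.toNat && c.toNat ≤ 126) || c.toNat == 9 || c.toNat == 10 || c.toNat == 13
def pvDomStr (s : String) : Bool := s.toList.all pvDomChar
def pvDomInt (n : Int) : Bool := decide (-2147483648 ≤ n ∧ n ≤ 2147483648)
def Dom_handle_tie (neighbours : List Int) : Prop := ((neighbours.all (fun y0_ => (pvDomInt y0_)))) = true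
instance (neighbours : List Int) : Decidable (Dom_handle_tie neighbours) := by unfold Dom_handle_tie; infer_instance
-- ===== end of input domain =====

-- B drops A's dead loop (flag is overwritten every pass) and directly compares count(last) with count(first); asymptotically faster.

-- ===== PORT A =====
def handle_tie (neighbours : List Int) : String :=
  match PySem.List.pyGet? neighbours 0 with
  | none => ""  -- indexing the first element raises IndexError; excluded by Pre_
  | some h0 =>
    let equal := PySem.List.count neighbours h0
    (PySem.List.pyRange 0 neighbours.length 1).foldl
      (fun flag i =>
        match PySem.List.pyGet? neighbours i with
        | none => flag  -- unreachable: i is in range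
        | some x => if PySem.List.count neighbours x = equal then "E" else "N") ""

-- ===== PORT B =====
def handle_tie_alt (neighbours : List Int) : String :=
  match PySem.List.pyGet? neighbours (-1), PySem.List.pyGet? neighbours 0 with
  | some last, some first =>
      if PySem.List.count neighbours last = PySem.List.count neighbours first then "E" else "N"
  | _, _ => ""  -- indexing raises IndexError; excluded by Pre_

-- ===== PRECONDITION & SPEC =====
-- Pre_ excludes only the empty list, on which Python A raises IndexError when indexing the first element.
def Pre_handle_tie (neighbours : List Int) : Prop := neighbours ≠ []
instance (neighbours : List Int) : Decidable (Pre_handle_tie neighbours) := by unfold Pre_handle_tie; infer_instance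
def pvWitness_handle_tie : List Int := [1, 2, 2, 1]
def Spec_handle_tie (neighbours : List Int) (out : String) : Prop := out = handle_tie_alt neighbours
instance (neighbours : List Int) (out : String) : Decidable (Spec_handle_tie neighbours out) := by unfold Spec_handle_tie; infer_instance

-- ===== CLAIM (what is proved, stated in full; the proofs are below) =====
def Claim_equal_handle_tie : Prop := ∀ (neighbours : List Int), Dom_handle_tie neighbours → Pre_handle_tie neighbours → Spec_handle_tie neighbours (handle_tie neighbours)

-- ===== LEMMAS AND PROOFS =====

-- ===== VERDICT (by name: the statement is the Claim_ definition above) =====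
theorem handle_tie_spec : Claim_equal_handle_tie := by
  intro ns _ hpre
  obtain ⟨l, x, rfl⟩ := List.eq_nil_or_concat ns |>.resolve_left hpre
  unfold Spec_handle_tie handle_tie handle_tie_alt
  simp only [List.concat_eq_append]
  have h0 : PySem.List.pyGet? (l ++ [x]) 0 = some ((l ++ [x]).head (by simp)) := by
    rw [PySem.List.pyGet?_zero, List.getElem?_eq_getElem (by simp),
        List.head_eq_getElem]
  have hlen : ((l ++ [x]).length : Int) = (l.length : Int) + 1 := by simp
  rw [h0, PySem.List.pyGet?_neg_one_append_singleton, hlen,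
      PySem.List.pyRange_one_succ_right (by positivity)]
  simp only [List.foldl_append, List.foldl_cons, List.foldl_nil]
  rw [PySem.List.pyGet?_append_length]
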